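-- pv_equiv track=rewrite | github.com/DanGidanehin/coursework | two_stage.py | create_initial_allocation
-- ===== SOURCE A (Python) =====
-- def create_initial_allocation(matrix):
--     """
--     Етап 1: Створити початковий розподіл, розділивши матрицю на 4 блоки у
--     рядково-стовпчиковому порядку.
--
--     Args:
--         matrix: матриця вартостей
--
--     Returns:
--         список з 4 регіонами (списками координат)
--     """
--     n = len(matrix)
--     m = len(matrix[0])
--     total_cells = n * m
--
--     # Створити список всіх клітин у рядково-стовпчиковому порядку
--     all_cells = []
--     for i in range(n):
--         for j in range(m):
--             all_cells.append((i, j))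
--
--     # Розділити клітини на 4 приблизно рівні частини
--     cells_per_region = total_cells // 4
--     remainder = total_cells % 4
--
--     regions = [[], [], [], []]
--     start_idx = 0
--
--     for dev in range(4):
--         # Додати одну додаткову клітину до перших remainder регіонів
--         region_size = cells_per_region + (1 if dev < remainder else 0)
--         end_idx = start_idx + region_size
--
--         regions[dev] = all_cells[start_idx:end_idx]
--         start_idx = end_idx
--
--     return regions
-- ===== SOURCE B (Python) =====
-- def create_initial_allocation(matrix):
--     """
--     Етап 1: Створити початковий розподіл, розділивши матрицю на 4 блоки у
--     рядково-стовпчиковому порядку.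
--     """
--     n = len(matrix)
--     m = len(matrix[0])
--     total_cells = n * m
--
--     base = total_cells // 4
--     remainder = total_cells % 4
--
--     # cumulative flat-index boundaries of the 4 regions
--     bounds = [0]
--     for k in range(4):
--         bounds.append(bounds[-1] + base + (1 if k < remainder else 0))
--
--     # derive coordinates on the fly from flat indices; no all_cells list
--     regions = []
--     for k in range(4):
--         region = []
--         for idx in range(bounds[k], bounds[k + 1]):
--             i, j = divmod(idx, m)
--             region.append((i, j))
--         regions.append(region)
--     return regions
-- ===== Notes on version B (the rewrite author's own statement) =====
-- stated objective: alternative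
-- what changed: B never materializes the flat all_cells list nor slices it: it precomputes the four cumulative flat-index boundaries and reconstructs each coordinate on the fly via divmod(idx, m) while looping each region's index range.
import Mathlib
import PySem

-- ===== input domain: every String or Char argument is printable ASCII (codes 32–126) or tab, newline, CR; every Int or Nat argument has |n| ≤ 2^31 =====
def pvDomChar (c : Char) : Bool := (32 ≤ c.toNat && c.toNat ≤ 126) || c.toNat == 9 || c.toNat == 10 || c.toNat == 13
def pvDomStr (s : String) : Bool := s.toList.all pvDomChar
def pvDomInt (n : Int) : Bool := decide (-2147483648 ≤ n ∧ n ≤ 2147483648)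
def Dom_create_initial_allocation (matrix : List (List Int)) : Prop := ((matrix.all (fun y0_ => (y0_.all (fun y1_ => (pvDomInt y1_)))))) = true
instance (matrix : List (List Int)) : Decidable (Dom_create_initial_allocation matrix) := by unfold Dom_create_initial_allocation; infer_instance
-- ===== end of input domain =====

-- B replaces A's materialized all_cells list and its slicing by precomputed cumulative
-- flat-index boundaries with coordinates reconstructed on the fly via divmod(idx, m)
-- (an alternative decomposition of the same O(n*m) partition).

-- ===== PORT A =====
def create_initial_allocation (matrix : List (List Int)) : List (List (Int × Int)) :=
  let n : Int := matrix.length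
  let m : Int := (PySem.List.pyGetD matrix 0 []).length   -- matrix[0]; Pre_ excludes the empty matrix (IndexError)
  let total_cells : Int := n * m
  let all_cells : List (Int × Int) :=
    (PySem.List.pyRange 0 n 1).foldl (fun acc i =>
      (PySem.List.pyRange 0 m 1).foldl (fun acc2 j => acc2 ++ [(i, j)]) acc) []
  let cells_per_region : Int := PySem.Int.floordiv total_cells 4
  let remainder : Int := PySem.Int.mod total_cells 4
  let st :=
    (PySem.List.pyRange 0 4 1).foldl
      (fun (st : List (List (Int × Int)) × Int) dev =>
        let region_size := cells_per_region + (if dev < remainder then (1:Int) else 0)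
        let end_idx := st.2 + region_size
        (PySem.List.pySetD st.1 dev (PySem.List.slice all_cells (some st.2) (some end_idx)), end_idx))
      ([[], [], [], []], 0)
  st.1

-- ===== PORT B =====
def create_initial_allocation_alt (matrix : List (List Int)) : List (List (Int × Int)) :=
  let n : Int := matrix.length
  let m : Int := (PySem.List.pyGetD matrix 0 []).length   -- matrix[0]; Pre_ excludes the empty matrix (IndexError)
  let total_cells : Int := n * m
  let base : Int := PySem.Int.floordiv total_cells 4
  let remainder : Int := PySem.Int.mod total_cells 4
  let bounds : List Int :=
    (PySem.List.pyRange 0 4 1).foldl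
      (fun bs k => bs ++ [PySem.List.pyGetD bs (-1) 0 + base + (if k < remainder then (1:Int) else 0)])
      [0]
  (PySem.List.pyRange 0 4 1).foldl
    (fun regs k =>
      let region :=
        (PySem.List.pyRange (PySem.List.pyGetD bounds k 0) (PySem.List.pyGetD bounds (k + 1) 0) 1).foldl
          (fun r idx => r ++ [(PySem.Int.floordiv idx m, PySem.Int.mod idx m)]) []
      regs ++ [region])
    []

-- ===== PRECONDITION & SPEC =====
-- Pre_: the Python A evaluates matrix[0], which raises IndexError exactly when the matrix is empty.
def Pre_create_initial_allocation (matrix : List (List Int)) : Prop := matrix ≠ []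
instance (matrix : List (List Int)) : Decidable (Pre_create_initial_allocation matrix) := by unfold Pre_create_initial_allocation; infer_instance
def pvWitness_create_initial_allocation : List (List Int) := [[1, 2], [3, 4]]

def Spec_create_initial_allocation (matrix : List (List Int)) (out : List (List (Int × Int))) : Prop := out = create_initial_allocation_alt matrix
instance (matrix : List (List Int)) (out : List (List (Int × Int))) : Decidable (Spec_create_initial_allocation matrix out) := by unfold Spec_create_initial_allocation; infer_instance

-- ===== CLAIM (what is proved, stated in full; the proofs are below) =====
def Claim_equal_create_initial_allocation : Prop := ∀ (matrix : List (List Int)), Dom_create_initial_allocation matrix → Pre_create_initial_allocation matrix → Spec_create_initial_allocation matrix (create_initial_allocation matrix)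

-- ===== LEMMAS AND PROOFS =====

-- slicing a mapped index range is mapping over the sub-range
theorem pv_slice_map_pyRange {α : Type} (f : Int → α) (N a b : Int)
    (ha : 0 ≤ a) (hab : a ≤ b) (hbN : b ≤ N) :
    PySem.List.slice ((PySem.List.pyRange 0 N 1).map f) (some a) (some b)
      = (PySem.List.pyRange a b 1).map f := by
  rw [PySem.List.slice_toNat _ ha (ha.trans hab)]
  apply List.ext_getElem
  · simp only [List.length_take, List.length_drop, List.length_map,
      PySem.List.length_pyRange_one]
    omega
  · intro i h1 h2
    simp only [List.getElem_take, List.getElem_drop, List.getElem_map]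
    rw [PySem.List.getElem_pyRange_one, PySem.List.getElem_pyRange_one]
    congr 1
    omega

-- pv_slice_map_pyRange with the target bounds given as separate (provably equal) terms
theorem pv_region_eq {α : Type} (f : Int → α) (N a b a' b' : Int)
    (ha : 0 ≤ a) (hab : a ≤ b) (hbN : b ≤ N) (ha' : a = a') (hb' : b = b') :
    PySem.List.slice ((PySem.List.pyRange 0 N 1).map f) (some a) (some b)
      = (PySem.List.pyRange a' b' 1).map f := by
  subst ha' hb'; exact pv_slice_map_pyRange f N a b ha hab hbN

-- A's row-by-row cell list is the divmod image of the flat index range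
theorem pv_all_cells (n m : Nat) :
    (PySem.List.pyRange 0 (n : Int) 1).foldl (fun acc i =>
        (PySem.List.pyRange 0 (m : Int) 1).foldl (fun acc2 j => acc2 ++ [(i, j)]) acc) []
      = (PySem.List.pyRange 0 ((n : Int) * (m : Int)) 1).map
          (fun idx => (PySem.Int.floordiv idx (m : Int), PySem.Int.mod idx (m : Int))) := by
  induction n with
  | zero =>
    simp only [Nat.cast_zero, zero_mul, PySem.List.pyRange_one_eq_nil le_rfl,
      List.foldl_nil, List.map_nil]
  | succ n ih =>
    have h1 : ((n + 1 : Nat) : Int) = (n : Int) + 1 := by push_cast; ring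
    rw [h1, PySem.List.pyRange_one_succ_right (by positivity), List.foldl_append]
    simp only [List.foldl_cons, List.foldl_nil]
    rw [ih, PySem.List.foldl_append_singleton_eq_map]
    have h2 : ((n : Int) + 1) * (m : Int) = (n : Int) * m + m := by ring
    rw [h2, PySem.List.pyRange_one_append 0 ((n : Int) * m) ((n : Int) * m + (m : Int))
          (by positivity) (le_add_of_nonneg_right (by positivity)), List.map_append]
    congr 1
    apply List.ext_getElem
    · simp only [List.length_map, PySem.List.length_pyRange_one, sub_zero,
        add_sub_cancel_left]
    · intro i hA hB
      have him : i < m := by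
        simpa [PySem.List.length_pyRange_one] using hA
      have hmpos : (0 : Int) < (m : Int) := by exact_mod_cast (show 0 < m by omega)
      simp only [List.getElem_map]
      rw [PySem.List.getElem_pyRange_one, PySem.List.getElem_pyRange_one]
      have hi0 : (0 : Int) ≤ (i : Int) := by positivity
      have him' : (i : Int) < (m : Int) := by exact_mod_cast him
      have hcomm : ((n : Int) * m + i) = (i : Int) + (n : Int) * m := by ring
      have hdiv : ((n : Int) * m + i) / (m : Int) = (n : Int) := by
        rw [hcomm, Int.add_mul_ediv_right _ _ (by omega : (m : Int) ≠ 0),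
          Int.ediv_eq_zero_of_lt hi0 him']
        ring
      have hmod : ((n : Int) * m + i) % (m : Int) = (i : Int) := by
        rw [hcomm, Int.add_mul_emod_self_right]
        exact Int.emod_eq_of_lt hi0 him'
      rw [PySem.Int.floordiv_eq_ediv_of_pos hmpos, PySem.Int.mod_eq_emod_of_pos hmpos,
        hdiv, hmod]
      simp

-- the two ports agree on every input
theorem pv_main (mx : List (List Int)) :
    create_initial_allocation mx = create_initial_allocation_alt mx := by
  simp only [create_initial_allocation, create_initial_allocation_alt]
  generalize (PySem.List.pyGetD mx 0 ([] : List Int)).length = m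
  generalize mx.length = n
  rw [show PySem.List.pyRange 0 4 1 = [0, 1, 2, 3] from by decide]
  simp only [List.foldl_cons, List.foldl_nil]
  rw [pv_all_cells n m]
  set T := (n : Int) * (m : Int) with hT
  set Q := PySem.Int.floordiv T 4 with hQ
  set R := PySem.Int.mod T 4 with hR
  have hT0 : (0 : Int) ≤ T := by rw [hT]; positivity
  have hq0 : 0 ≤ Q := by
    rw [hQ, PySem.Int.floordiv_eq_ediv_of_pos (by norm_num : (0:Int) < 4)]
    exact Int.ediv_nonneg hT0 (by norm_num)
  have hr0 : 0 ≤ R := hR ▸ PySem.Int.mod_nonneg _ (by norm_num)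
  have hr4 : R < 4 := hR ▸ PySem.Int.mod_lt _ (by norm_num)
  have htot : Q * 4 + R = T := by rw [hQ, hR]; exact PySem.Int.floordiv_mul_add_mod _ _
  have hset : ∀ (s0 s1 s2 s3 : List (Int × Int)),
      PySem.List.pySetD (PySem.List.pySetD (PySem.List.pySetD
        (PySem.List.pySetD [[], [], [], []] 0 s0) 1 s1) 2 s2) 3 s3 = [s0, s1, s2, s3] :=
    fun _ _ _ _ => rfl
  have hg1 : ∀ (a : Int), PySem.List.pyGetD [a] (-1) 0 = a := fun _ => rfl
  have hg2 : ∀ (a b : Int), PySem.List.pyGetD [a, b] (-1) 0 = b := fun _ _ => rfl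
  have hg3 : ∀ (a b c : Int), PySem.List.pyGetD [a, b, c] (-1) 0 = c := fun _ _ _ => rfl
  have hg4 : ∀ (a b c d : Int), PySem.List.pyGetD [a, b, c, d] (-1) 0 = d := fun _ _ _ _ => rfl
  have hx0 : ∀ (a b c d e : Int), PySem.List.pyGetD [a, b, c, d, e] 0 0 = a := fun _ _ _ _ _ => rfl
  have hx1 : ∀ (a b c d e : Int), PySem.List.pyGetD [a, b, c, d, e] (0 + 1) 0 = b := fun _ _ _ _ _ => rfl
  have hx1' : ∀ (a b c d e : Int), PySem.List.pyGetD [a, b, c, d, e] 1 0 = b := fun _ _ _ _ _ => rfl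
  have hx2 : ∀ (a b c d e : Int), PySem.List.pyGetD [a, b, c, d, e] (1 + 1) 0 = c := fun _ _ _ _ _ => rfl
  have hx2' : ∀ (a b c d e : Int), PySem.List.pyGetD [a, b, c, d, e] 2 0 = c := fun _ _ _ _ _ => rfl
  have hx3 : ∀ (a b c d e : Int), PySem.List.pyGetD [a, b, c, d, e] (2 + 1) 0 = d := fun _ _ _ _ _ => rfl
  have hx3' : ∀ (a b c d e : Int), PySem.List.pyGetD [a, b, c, d, e] 3 0 = d := fun _ _ _ _ _ => rfl
  have hx4 : ∀ (a b c d e : Int), PySem.List.pyGetD [a, b, c, d, e] (3 + 1) 0 = e := fun _ _ _ _ _ => rfl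
  simp only [hset, hg1, hg2, hg3, hg4, hx0, hx1, hx1', hx2, hx2', hx3, hx3', hx4,
    PySem.List.foldl_append_singleton_eq_map, List.cons_append, List.nil_append,
    List.cons.injEq, and_true]
  refine ⟨?_, ?_, ?_, ?_⟩ <;>
    · apply pv_region_eq <;> (try split_ifs) <;> omega

-- ===== VERDICT (by name: the statement is the Claim_ definition above) =====
theorem create_initial_allocation_spec : Claim_equal_create_initial_allocation := by
  intro mx hdom hpre
  unfold Spec_create_initial_allocation
  exact pv_main mx
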